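-- pv_equiv track=rewrite | github.com/macginitie/pyscripts | caps2camel.py | caps2camel
-- ===== SOURCE A (Python) =====
-- def caps2camel(instr):
--     outstr = ''
--     cap = False
--     for ch in instr:
--         if ch >= 'A' and ch <= 'Z':
--             if cap:
--                 outstr += ch
--                 cap = False
--             else:
--                 outstr += ch.lower()
--         if ch == '_':
--             cap = True
--     return outstr
-- ===== SOURCE B (Python) =====
-- def caps2camel(instr):
--     filtered = ''.join(ch for ch in instr if ('A' <= ch <= 'Z') or ch == '_')
--     tokens = filtered.split('_')
--     return tokens[0].lower() + ''.join(tok.capitalize() for tok in tokens[1:])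
-- ===== Notes on version B (the rewrite author's own statement) =====
-- stated objective: idiomatic
-- what changed: Replaces A's per-character state machine (a cap flag threaded through the loop) with filter, then split on underscores, then lower/capitalize applied to whole tokens.
import Mathlib
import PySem

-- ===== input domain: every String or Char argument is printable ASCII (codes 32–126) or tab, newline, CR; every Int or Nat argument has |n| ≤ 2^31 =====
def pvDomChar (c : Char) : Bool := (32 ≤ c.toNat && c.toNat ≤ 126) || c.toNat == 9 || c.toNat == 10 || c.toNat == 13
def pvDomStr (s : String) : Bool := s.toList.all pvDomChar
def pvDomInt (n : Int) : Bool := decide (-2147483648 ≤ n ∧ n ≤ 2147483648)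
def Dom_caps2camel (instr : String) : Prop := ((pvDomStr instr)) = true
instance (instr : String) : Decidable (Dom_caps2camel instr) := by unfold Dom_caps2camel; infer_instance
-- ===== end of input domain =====

-- B replaces A's per-character cap-flag state machine with filter + split('_') + token-wise lower/capitalize (more idiomatic, same result).

-- ===== PORT A =====
-- literal transliteration of A's loop: state (outstr, cap), two sequential ifs per character
def caps2camelStep (st : List Char × Bool) (ch : Char) : List Char × Bool :=
  let st1 := if 'A' ≤ ch ∧ ch ≤ 'Z' then
      (if st.2 then (st.1 ++ [ch], false) else (st.1 ++ PySem.Chars.lower [ch], st.2))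
    else st
  if ch = '_' then (st1.1, true) else st1

def caps2camel (instr : String) : String :=
  let r := instr.toList.foldl caps2camelStep ([], false)
  String.mk r.1

-- ===== PORT B =====
def keepB (c : Char) : Bool := ('A' ≤ c && c ≤ 'Z') || c == '_'

-- port of str.split('_') (exact for a one-character separator)
def splitU : List Char → List (List Char)
  | [] => [[]]
  | c :: t => if c = '_' then [] :: splitU t
      else (c :: (splitU t).headI) :: (splitU t).tail

-- port of str.capitalize() (exact on ASCII)
def capTok : List Char → List Char
  | [] => []
  | c :: r => PySem.Chars.upperChar c :: PySem.Chars.lower r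

def caps2camel_alt (instr : String) : String :=
  let toks := splitU (instr.toList.filter keepB)
  String.mk (PySem.Chars.lower toks.headI ++ (toks.tail.map capTok).flatten)

-- ===== PRECONDITION & SPEC =====
def Spec_caps2camel (instr : String) (out : String) : Prop := out = caps2camel_alt instr
instance (instr : String) (out : String) : Decidable (Spec_caps2camel instr out) := by unfold Spec_caps2camel; infer_instance

-- ===== CLAIM (what is proved, stated in full; the proofs are below) =====
def Claim_equal_caps2camel : Prop := ∀ (instr : String), Dom_caps2camel instr → Spec_caps2camel instr (caps2camel instr)

-- ===== LEMMAS AND PROOFS =====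

-- reference machine: what A appends, as a pure recursion over the characters
def goF : List Char → Bool → List Char
  | [], _ => []
  | c :: t, cap =>
      if c = '_' then goF t true
      else if 'A' ≤ c ∧ c ≤ 'Z' then
        (if cap then c :: goF t false else PySem.Chars.lowerChar c :: goF t cap)
      else goF t cap

lemma foldA (l : List Char) (acc : List Char) (cap : Bool) :
    (l.foldl caps2camelStep (acc, cap)).1 = acc ++ goF l cap := by
  induction l generalizing acc cap with
  | nil => simp [goF]
  | cons c t ih =>
    by_cases hu : c = '_'
    · subst hu
      simp [List.foldl, caps2camelStep, goF, ih]
    · by_cases hup : 'A' ≤ c ∧ c ≤ 'Z'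
      · cases cap with
        | false =>
          simp [List.foldl, caps2camelStep, hu, hup, goF, ih, PySem.Chars.lower]
        | true =>
          simp [List.foldl, caps2camelStep, hu, hup, goF, ih]
      · simp [List.foldl, caps2camelStep, hu, hup, goF, ih]

lemma goF_filter (l : List Char) (cap : Bool) :
    goF l cap = goF (l.filter keepB) cap := by
  induction l generalizing cap with
  | nil => simp
  | cons c t ih =>
    by_cases hk : keepB c = true
    · by_cases hu : c = '_'
      · subst hu; simp [goF, hk, ih]
      · have hup : 'A' ≤ c ∧ c ≤ 'Z' := by
          simp [keepB, hu] at hk; exact hk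
        simp [goF, hk, hu, hup, ih]
    · have hu : ¬ c = '_' := by intro h; subst h; simp [keepB] at hk
      have hup : ¬ ('A' ≤ c ∧ c ≤ 'Z') := by
        intro h; exact hk (by simp [keepB, h.1, h.2])
      simp [goF, hk, hu, hup, ih]

lemma upperChar_of_upper (c : Char) (h1 : 'A' ≤ c) (h2 : c ≤ 'Z') :
    PySem.Chars.upperChar c = c := by
  have h : ¬ ('a' ≤ c) := by
    intro h
    rw [Char.le_def] at h h2
    exact absurd (UInt32.le_trans h h2) (by decide)
  simp [PySem.Chars.upperChar, PySem.Chars.islower, h]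

-- on a list of kept characters, the flag machine equals the split-based computation
lemma goF_split (l : List Char) (cap : Bool) (hall : ∀ c ∈ l, keepB c = true) :
    goF l cap = if cap then ((splitU l).map capTok).flatten
      else PySem.Chars.lower (splitU l).headI ++ (((splitU l).tail).map capTok).flatten := by
  induction l generalizing cap with
  | nil => cases cap <;> simp [goF, splitU, capTok, PySem.Chars.lower]
  | cons c t ih =>
    have hallt : ∀ x ∈ t, keepB x = true := fun x hx => hall x (List.mem_cons_of_mem _ hx)
    by_cases hu : c = '_'
    · subst hu
      have := ih true hallt
      cases cap <;> simp [goF, splitU, capTok, this, PySem.Chars.lower]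
    · have hup : 'A' ≤ c ∧ c ≤ 'Z' := by
        have := hall c (List.mem_cons_self)
        simp [keepB, hu] at this; exact this
      cases cap with
      | false =>
        simp [goF, hu, hup, splitU, ih false hallt, PySem.Chars.lower]
      | true =>
        simp [goF, hu, hup, splitU, capTok, ih false hallt,
          upperChar_of_upper c hup.1 hup.2, PySem.Chars.lower]

-- ===== VERDICT (by name: the statement is the Claim_ definition above) =====
theorem caps2camel_spec : Claim_equal_caps2camel := by
  intro instr _
  unfold Spec_caps2camel caps2camel caps2camel_alt
  have h1 := foldA instr.toList [] false
  have h2 := goF_filter instr.toList false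
  have h3 := goF_split (instr.toList.filter keepB) false
    (fun c hc => (List.mem_filter.mp hc).2)
  simp only [h1, h2, h3, List.nil_append, if_neg (Bool.false_ne_true)]
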